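-- pv_equiv track=rewrite | github.com/ufidon/CS430 | P03/playfair.py | gendigram
-- ===== SOURCE A (Python) =====
-- def i2j(strin):
-- 	''' convert all 'i's in strin to 'j'
-- 	'''
-- 	ilist = list(strin)
-- 	olist = []
--
-- 	for ch in ilist:
-- 		if ch == 'i':
-- 			olist.append('j')
-- 		else:
-- 			olist.append(ch)
--
-- 	return "".join(olist)
--
-- def gendigram(plain, pad='x'):
-- 	jplain = i2j(plain)
--
-- 	numchar = len(jplain)
--
-- 	digram = []
-- 	i = 0
-- 	while((i < numchar) and (i+1<numchar)):
-- 		if jplain[i] != jplain[i+1]: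
-- 			digram.append(jplain[i:i+2])
-- 			i += 2
-- 		else:
-- 			digram.append(jplain[i]+pad)
-- 			i += 1
--
-- 		if(i == numchar-1):
-- 				digram.append(jplain[i]+pad)
-- 	return digram
-- ===== SOURCE B (Python) =====
-- def gendigram(plain, pad='x'):
--     s = plain.replace('i', 'j')
--     digram = []
--     pending = None
--     for ch in s:
--         if pending is None:
--             pending = ch
--         elif ch == pending:
--             digram.append(pending + pad)
--             # ch becomes the new pending first letter
--         else:
--             digram.append(pending + ch)
--             pending = None
--     if pending is not None:
--         digram.append(pending + pad)
--     return digram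
-- ===== Notes on version B (the rewrite author's own statement) =====
-- stated objective: alternative
-- what changed: Replaces A's index-arithmetic while-loop (lookahead jplain[i+1], i advancing by 1 or 2, an in-loop last-char check) by a single left-to-right state-machine pass carrying one pending first letter, flushed once after the loop.
-- intended difference: On single-character plaintexts A returns [] (its padding step sits inside a loop that never runs) while B returns the one padded digram [char+pad], which is the intended Playfair padding of a trailing single letter. — e.g. on gendigram("a", "x"): A returns [], B returns ["ax"]
import Mathlib
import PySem

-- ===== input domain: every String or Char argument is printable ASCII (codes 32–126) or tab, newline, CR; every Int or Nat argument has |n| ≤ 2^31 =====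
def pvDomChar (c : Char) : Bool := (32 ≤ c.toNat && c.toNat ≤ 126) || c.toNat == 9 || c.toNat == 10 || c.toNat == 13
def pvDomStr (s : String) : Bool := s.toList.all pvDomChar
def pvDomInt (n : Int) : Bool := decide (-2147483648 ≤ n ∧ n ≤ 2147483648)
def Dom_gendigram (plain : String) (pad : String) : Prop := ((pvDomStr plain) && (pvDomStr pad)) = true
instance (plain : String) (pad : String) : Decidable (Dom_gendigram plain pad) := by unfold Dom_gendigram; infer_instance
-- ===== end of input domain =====

-- B replaces A's index-arithmetic lookahead loop by a one-pass pending-letter state machine;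
-- on single-character plaintexts B pads (the intended Playfair behaviour) where A returns [] (see D_).

-- ===== PORT A =====
-- i2j: loop over the characters, appending 'j' for 'i', joined back to a string
def i2j (strin : String) : String :=
  String.mk (strin.toList.foldl (fun olist ch => olist ++ [if ch = 'i' then 'j' else ch]) [])

-- the while-loop of A; i increases by 1 or 2 each iteration, indexing is always in range
def gendigramLoop (jp : List Char) (pad : String) (numchar : Nat) (i : Nat)
    (digram : List String) : List String :=
  if _h : i < numchar ∧ i + 1 < numchar then
    if jp.getD i ' ' ≠ jp.getD (i+1) ' ' then
      -- digram.append(jplain[i:i+2]); i += 2; then the trailing-singleton check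
      gendigramLoop jp pad numchar (i+2)
        (if i+2 = numchar - 1
          then (digram ++ [String.mk ((jp.drop i).take 2)]) ++ [String.mk (jp.getD (i+2) ' ' :: pad.toList)]
          else digram ++ [String.mk ((jp.drop i).take 2)])
    else
      -- digram.append(jplain[i]+pad); i += 1; then the trailing-singleton check
      gendigramLoop jp pad numchar (i+1)
        (if i+1 = numchar - 1
          then (digram ++ [String.mk (jp.getD i ' ' :: pad.toList)]) ++ [String.mk (jp.getD (i+1) ' ' :: pad.toList)]
          else digram ++ [String.mk (jp.getD i ' ' :: pad.toList)])
  else digram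
termination_by numchar - i
decreasing_by all_goals omega

def gendigram (plain : String) (pad : String) : List String :=
  let jplain := i2j plain
  gendigramLoop jplain.toList pad jplain.toList.length 0 []

-- ===== PORT B =====
-- single pass: `pending` holds the first letter of the current digram
def altLoop (pad : String) : List Char → Option Char → List String → List String
  | [], pending, digram =>
      match pending with
      | some p => digram ++ [String.mk (p :: pad.toList)]
      | none => digram
  | ch :: rest, pending, digram =>
      match pending with
      | none => altLoop pad rest (some ch) digram
      | some p =>
          if ch = p then altLoop pad rest (some ch) (digram ++ [String.mk (p :: pad.toList)])
          else altLoop pad rest none (digram ++ [String.mk [p, ch]])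

def gendigram_alt (plain : String) (pad : String) : List String :=
  let s := plain.toList.map (fun c => if c = 'i' then 'j' else c)   -- plain.replace('i','j')
  altLoop pad s none []

-- ===== PRECONDITION & SPEC =====
-- On single-character plaintexts A returns [] (its padding step sits inside a loop that never
-- runs) while B returns the one padded digram [char+pad], the intended Playfair padding.
def D_gendigram (plain : String) (pad : String) : Prop := plain.toList.length = 1
instance (plain : String) (pad : String) : Decidable (D_gendigram plain pad) := by
  unfold D_gendigram; infer_instance

def Spec_gendigram (plain : String) (pad : String) (out : List String) : Prop :=
  ¬ D_gendigram plain pad → out = gendigram_alt plain pad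
instance (plain : String) (pad : String) (out : List String) : Decidable (Spec_gendigram plain pad out) := by
  unfold Spec_gendigram; infer_instance

def pvDiffWitness_gendigram : String × String := ("a", "x")
def pvDiffWitnessOut_gendigram : (List String) × (List String) := ([], ["ax"])

-- ===== CLAIM (what is proved, stated in full; the proofs are below) =====
def Claim_unchanged_gendigram : Prop := ∀ (plain : String) (pad : String), Dom_gendigram plain pad → Spec_gendigram plain pad (gendigram plain pad)
def Claim_changed_gendigram : Prop := Dom_gendigram (pvDiffWitness_gendigram.1) (pvDiffWitness_gendigram.2) ∧ D_gendigram (pvDiffWitness_gendigram.1) (pvDiffWitness_gendigram.2) ∧ gendigram (pvDiffWitness_gendigram.1) (pvDiffWitness_gendigram.2) = pvDiffWitnessOut_gendigram.1 ∧ gendigram_alt (pvDiffWitness_gendigram.1) (pvDiffWitness_gendigram.2) = pvDiffWitnessOut_gendigram.2 ∧ pvDiffWitnessOut_gendigram.1 ≠ pvDiffWitnessOut_gendigram.2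
def Claim_exact_gendigram : Prop := ∀ (plain : String) (pad : String), Dom_gendigram plain pad → D_gendigram plain pad → gendigram plain pad ≠ gendigram_alt plain pad

-- ===== LEMMAS AND PROOFS =====

lemma foldl_i2j (f : Char → Char) (l : List Char) (acc : List Char) :
    l.foldl (fun o ch => o ++ [f ch]) acc = acc ++ l.map f := by
  induction l generalizing acc with
  | nil => simp
  | cons c t ih => simp [List.foldl, ih]

lemma toList_mk (l : List Char) : (String.mk l).toList = l :=
  Eq.symm (String.ofList_eq.mp rfl)

lemma i2j_toList (s : String) :
    (i2j s).toList = s.toList.map (fun c => if c = 'i' then 'j' else c) := by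
  unfold i2j
  rw [foldl_i2j (fun c => if c = 'i' then 'j' else c), toList_mk]
  rfl

lemma getD_drop (l : List Char) (i : Nat) (c : Char) (rest : List Char)
    (h : l.drop i = c :: rest) : l.getD i ' ' = c := by
  have : l[i]? = some c := by
    rw [← List.head?_drop, h]; rfl
  simp [List.getD, this]

lemma loop_eq (pad : String) (jp : List Char) :
    ∀ k i digram, jp.length - i = k → i + 1 < jp.length →
      gendigramLoop jp pad jp.length i digram = altLoop pad (jp.drop i) none digram := by
  intro k
  induction k using Nat.strong_induction_on with
  | _ k IH =>
    intro i digram hk h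
    -- the remaining suffix has at least two characters
    obtain ⟨c, d, rest, hdrop⟩ : ∃ c d rest, jp.drop i = c :: d :: rest := by
      cases h1 : jp.drop i with
      | nil => exfalso; have := congrArg List.length h1; simp at this; omega
      | cons c t =>
        cases h2 : t with
        | nil =>
          exfalso
          have := congrArg List.length h1
          simp [h2] at this; omega
        | cons d rest => exact ⟨c, d, rest, rfl⟩
    have hlen : jp.length = i + rest.length + 2 := by
      have := congrArg List.length hdrop
      simp at this; omega
    have hci : jp.getD i ' ' = c := getD_drop jp i c _ hdrop
    have hdrop1 : jp.drop (i+1) = d :: rest := by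
      have := congrArg (List.drop 1) hdrop
      rw [List.drop_drop] at this
      simpa using this
    have hdrop2 : jp.drop (i+2) = rest := by
      have := congrArg (List.drop 2) hdrop
      rw [List.drop_drop] at this
      simpa [Nat.add_comm] using this
    have hdi : jp.getD (i+1) ' ' = d := getD_drop jp (i+1) d _ hdrop1
    rw [gendigramLoop]
    rw [dif_pos ⟨by omega, h⟩]
    by_cases hcd : c = d
    · -- equal pair: A appends c+pad and advances by 1
      subst hcd
      rw [if_neg (by rw [hci, hdi]; simp)]
      rw [hci]
      by_cases hrest : rest = []
      · -- i+1 is the last index: A pads it inside the loop, then exits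
        subst hrest
        simp only [List.length_nil] at hlen
        rw [if_pos (by omega)]
        rw [hdi]
        rw [gendigramLoop]
        rw [dif_neg (by omega)]
        rw [hdrop]
        simp [altLoop]
      · have hrl : rest.length ≠ 0 := fun h0 => hrest (List.eq_nil_of_length_eq_zero h0)
        rw [if_neg (by omega)]
        rw [IH (jp.length - (i+1)) (by omega) (i+1)
          (digram ++ [String.mk (c :: pad.toList)]) rfl (by omega)]
        rw [hdrop1, hdrop]
        simp [altLoop]
    · -- distinct pair: A appends the two-character slice and advances by 2
      rw [if_pos (by rw [hci, hdi]; exact hcd)]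
      have htake : (jp.drop i).take 2 = [c, d] := by rw [hdrop]; rfl
      rw [htake]
      rcases hr : rest with _ | ⟨e, rest'⟩
      · -- nothing left: i+2 = length, no trailing pad
        subst hr
        simp only [List.length_nil] at hlen
        rw [if_neg (by omega)]
        rw [gendigramLoop]
        rw [dif_neg (by omega)]
        rw [hdrop]
        simp [altLoop, Ne.symm hcd]
      · rcases hr2 : rest' with _ | ⟨f, rest''⟩
        · -- exactly one char left: A pads it inside the loop, then exits
          subst hr; subst hr2
          simp only [List.length_cons, List.length_nil] at hlen
          rw [if_pos (by omega)]
          rw [getD_drop jp (i+2) e _ (by rw [hdrop2])]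
          rw [gendigramLoop]
          rw [dif_neg (by omega)]
          rw [hdrop]
          simp [altLoop, Ne.symm hcd]
        · -- at least two left: recurse / IH
          subst hr; subst hr2
          simp only [List.length_cons] at hlen
          rw [if_neg (by omega)]
          rw [IH (jp.length - (i+2)) (by omega) (i+2)
            (digram ++ [String.mk [c, d]]) rfl (by omega)]
          rw [hdrop2, hdrop]
          simp [altLoop, Ne.symm hcd]

-- ===== VERDICT (by name: the statement is the Claim_ definition above) =====
theorem gendigram_spec : Claim_unchanged_gendigram := by
  intro plain pad _ hD
  show gendigramLoop (i2j plain).toList pad (i2j plain).toList.length 0 []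
      = altLoop pad (plain.toList.map (fun c => if c = 'i' then 'j' else c)) none []
  rw [i2j_toList]
  set s := plain.toList.map (fun c => if c = 'i' then 'j' else c) with hs
  have hne : s.length ≠ 1 := by
    intro h1
    apply hD
    unfold D_gendigram
    simpa [hs] using h1
  rcases hl : s with _ | ⟨c, t⟩
  · rw [gendigramLoop]; simp [altLoop]
  · rcases ht : t with _ | ⟨d, t'⟩
    · exfalso; apply hne; rw [hl, ht]; rfl
    · have h2 : 0 + 1 < s.length := by rw [hl, ht]; simp
      have := loop_eq pad s (s.length - 0) 0 [] rfl h2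
      simpa [hl, ht] using this

theorem gendigram_changed : Claim_changed_gendigram := by
  refine ⟨by decide, by decide, ?_, by decide, by decide⟩
  show gendigram "a" "x" = []
  show gendigramLoop (i2j "a").toList "x" (i2j "a").toList.length 0 [] = []
  rw [gendigramLoop]
  rw [dif_neg (by decide)]

theorem gendigram_tight : Claim_exact_gendigram := by
  intro plain pad _ hD
  unfold D_gendigram at hD
  obtain ⟨c, hc⟩ : ∃ c, plain.toList = [c] := by
    rcases h : plain.toList with _ | ⟨c, t⟩
    · simp [h] at hD
    · rcases t with _ | ⟨d, t'⟩
      · exact ⟨c, rfl⟩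
      · simp [h] at hD
  show gendigramLoop (i2j plain).toList pad (i2j plain).toList.length 0 []
      ≠ altLoop pad (plain.toList.map (fun c => if c = 'i' then 'j' else c)) none []
  rw [i2j_toList, hc]
  rw [gendigramLoop]
  rw [dif_neg (by simp)]
  simp [altLoop]
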